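-- pv_equiv track=rewrite | github.com/josuemoraisgh/EININDII00_ProcessSimul | hrt/hrt_type.py | _hrt_type_pascii2_hex
-- ===== SOURCE A (Python) =====
-- def _hrt_type_pascii2_hex(valor: str, byte_size: int) -> str:
--     """
--     Converte string para HART PACKED ASCII (6 bits/char) em HEX com exatamente `byte_size` bytes.
--     Regras:
--       - a..z -> A..Z
--       - fora de 0x20..0x5F -> ' '
--       - se sobrar: corta do começo; se faltar: completa com espaço à direita
--       - sem padding de zeros em bits (requer byte_size % 3 == 0)
--     """
--     if byte_size <= 0:
--         return ""
--
--     # 8*byte_size precisa ser múltiplo de 6 -> byte_size múltiplo de 3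
--     if byte_size % 3 != 0:
--         raise ValueError("byte_size deve ser múltiplo de 3 para PACKED ASCII sem padding de bits.")
--
--     # 4 chars pASCII = 3 bytes
--     n_chars = (byte_size * 8) // 6  # = byte_size * 4 // 3
--
--     s = (valor or "")
--     # corta do começo se for maior
--     if len(s) > n_chars:
--         s = s[-n_chars:]
--     # completa com espaços se for menor
--     elif len(s) < n_chars:
--         s = s.ljust(n_chars, " ")
--
--     # normalização: a..z -> A..Z; fora do intervalo -> ' '
--     norm_codes = []
--     for c in s:
--         oc = ord(c)
--         # a..z -> A..Z
--         if 0x61 <= oc <= 0x7A:  # 'a'..'z'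
--             oc -= 0x20
--         # tudo que não estiver em 0x20..0x5F vira espaço
--         if not (0x20 <= oc <= 0x5F):
--             oc = 0x20
--         norm_codes.append(oc - 0x20)  # 0..63
--
--     # empacota 6 bits/char sem padding extra
--     bitstr = "".join(f"{code:06b}" for code in norm_codes)
--
--     # converte 8 em 8 para bytes -> hex
--     hex_str = "".join(f"{int(bitstr[i:i+8], 2):02X}" for i in range(0, len(bitstr), 8))
--     return hex_str
-- ===== SOURCE B (Python) =====
-- def _hrt_type_pascii2_hex(valor: str, byte_size: int) -> str:
--     if byte_size <= 0:
--         return ""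
--     if byte_size % 3 != 0:
--         raise ValueError("byte_size deve ser múltiplo de 3 para PACKED ASCII sem padding de bits.")
--     n_chars = byte_size * 8 // 6
--     # keep the last n_chars chars, pad with spaces on the right
--     s = (valor or "")[-n_chars:].ljust(n_chars, " ")
--     codes = [_pascii_code(c) for c in s]
--     pieces = []
--     while codes:
--         c0, c1, c2, c3 = codes[0], codes[1], codes[2], codes[3]
--         codes = codes[4:]
--         v = ((c0 * 64 + c1) * 64 + c2) * 64 + c3  # 4 codes -> one 24-bit value
--         pieces.append(f"{v // 65536:02X}{v // 256 % 256:02X}{v % 256:02X}")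
--     return "".join(pieces)
--
--
-- def _pascii_code(c: str) -> int:
--     oc = ord(c)
--     if 0x61 <= oc <= 0x7A:  # a..z -> A..Z
--         oc -= 0x20
--     return oc - 0x20 if 0x20 <= oc <= 0x5F else 0  # out of range -> space (code 0)
-- ===== Notes on version B (the rewrite author's own statement) =====
-- stated objective: alternative
-- what changed: Instead of rendering every 6-bit code to a '0'/'1' bit-string, concatenating, and re-parsing it in 8-bit slices with int(.,2), B packs each group of 4 codes into one 24-bit integer and emits its 3 bytes arithmetically; preprocessing is collapsed into a single slice-then-ljust expression.
import Mathlib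
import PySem

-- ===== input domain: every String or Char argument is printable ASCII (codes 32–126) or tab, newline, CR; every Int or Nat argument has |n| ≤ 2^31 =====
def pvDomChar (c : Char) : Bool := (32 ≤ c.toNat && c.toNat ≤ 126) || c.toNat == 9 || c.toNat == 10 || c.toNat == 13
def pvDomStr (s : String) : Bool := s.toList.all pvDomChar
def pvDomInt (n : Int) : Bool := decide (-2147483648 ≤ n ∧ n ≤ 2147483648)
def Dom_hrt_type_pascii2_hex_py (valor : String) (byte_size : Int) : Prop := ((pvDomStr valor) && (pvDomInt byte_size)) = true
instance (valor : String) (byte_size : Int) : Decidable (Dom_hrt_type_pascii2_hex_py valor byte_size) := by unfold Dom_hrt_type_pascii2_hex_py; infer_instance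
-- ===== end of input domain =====

-- B packs each group of 4 packed-ASCII codes into one 24-bit integer and emits its 3 bytes
-- directly, instead of A's global bit-string built char-by-char and re-parsed in 8-bit slices
-- (objective: alternative decomposition, similar cost).


-- f"{x:02X}": upper-case hex, zero-padded to width 2 (exact for 0 ≤ x; both Pythons contain
-- this very f-string, so both ports use this helper)
def pvHexCore (n : Nat) : List Char :=
  if h : n = 0 then []
  else pvHexCore (n / 16) ++ ["0123456789ABCDEF".toList.getD (n % 16) '0']
decreasing_by exact Nat.div_lt_self (Nat.pos_of_ne_zero h) (by omega)

def pvHex2 (x : Int) : List Char :=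
  let d := if x = 0 then ['0'] else pvHexCore x.toNat
  List.replicate (2 - d.length) '0' ++ d

-- ===== PORT A =====
-- f"{code:06b}" = format(code, 'b') zero-padded to width 6
def pvBin6 (code : Int) : List Char := PySem.Chars.zfill (PySem.Int.toBinChars code) 6

def hrt_type_pascii2_hex_py (valor : String) (byte_size : Int) : String :=
  if byte_size ≤ 0 then "" else
  if PySem.Int.mod byte_size 3 ≠ 0 then ""   -- raise ValueError: excluded by Pre_
  else
    let n_chars := PySem.Int.floordiv (byte_size * 8) 6
    let s := valor.toList                    -- (valor or "") : same list for a str argument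
    let s := if (s.length : Int) > n_chars then PySem.List.slice s (some (-n_chars)) none
             else if (s.length : Int) < n_chars then s ++ List.replicate (n_chars.toNat - s.length) ' '  -- s.ljust(n_chars, " ")
             else s
    let norm_codes := s.foldl (fun acc c =>
      let oc : Int := c.toNat                -- ord(c)
      let oc := if 0x61 ≤ oc ∧ oc ≤ 0x7A then oc - 0x20 else oc
      let oc := if ¬ (0x20 ≤ oc ∧ oc ≤ 0x5F) then (0x20 : Int) else oc
      acc ++ [oc - 0x20]) ([] : List Int)
    let bitstr := norm_codes.foldl (fun acc code => acc ++ pvBin6 code) ([] : List Char)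
    let hex_str := (PySem.List.pyRange 0 (bitstr.length : Int) 8).foldl (fun acc i =>
      acc ++ (match PySem.Int.ofCharsBase? (PySem.List.slice bitstr (some i) (some (i + 8))) 2 with
              | some b => pvHex2 b
              | none => [])) ([] : List Char)   -- int(bitstr[i:i+8], 2): the slice is binary digits, never fails
    String.mk hex_str

-- ===== PORT B =====
def pvPasciiCode (c : Char) : Int :=
  let oc : Int := c.toNat
  let oc := if 0x61 ≤ oc ∧ oc ≤ 0x7A then oc - 0x20 else oc
  if 0x20 ≤ oc ∧ oc ≤ 0x5F then oc - 0x20 else 0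

-- the while loop: 4 codes -> one 24-bit value -> 3 hex bytes (the list length is always a
-- multiple of 4 here, so the catch-all branch is the empty-list exit of the loop)
def pvPack : List Int → List Char
  | c0 :: c1 :: c2 :: c3 :: rest =>
      let v := ((c0 * 64 + c1) * 64 + c2) * 64 + c3
      pvHex2 (PySem.Int.floordiv v 65536)
        ++ pvHex2 (PySem.Int.mod (PySem.Int.floordiv v 256) 256)
        ++ pvHex2 (PySem.Int.mod v 256)
        ++ pvPack rest
  | _ => []

def hrt_type_pascii2_hex_py_alt (valor : String) (byte_size : Int) : String :=
  if byte_size ≤ 0 then "" else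
  if PySem.Int.mod byte_size 3 ≠ 0 then ""   -- raise ValueError: excluded by Pre_
  else
    let n_chars := PySem.Int.floordiv (byte_size * 8) 6
    let s0 := PySem.List.slice valor.toList (some (-n_chars)) none         -- (valor or "")[-n_chars:]
    let s := s0 ++ List.replicate (n_chars.toNat - s0.length) ' '          -- .ljust(n_chars, " ")
    String.mk (pvPack (s.map pvPasciiCode))

-- ===== PRECONDITION & SPEC =====
-- Pre_ excludes exactly the inputs where A raises ValueError (byte_size positive, not a multiple of 3);
-- B raises the same ValueError there.
def Pre_hrt_type_pascii2_hex_py (valor : String) (byte_size : Int) : Prop :=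
  byte_size ≤ 0 ∨ PySem.Int.mod byte_size 3 = 0
instance (valor : String) (byte_size : Int) : Decidable (Pre_hrt_type_pascii2_hex_py valor byte_size) := by unfold Pre_hrt_type_pascii2_hex_py; infer_instance

def pvWitness_hrt_type_pascii2_hex_py : String × Int := ("Hello", 6)

def Spec_hrt_type_pascii2_hex_py (valor : String) (byte_size : Int) (out : String) : Prop := out = hrt_type_pascii2_hex_py_alt valor byte_size
instance (valor : String) (byte_size : Int) (out : String) : Decidable (Spec_hrt_type_pascii2_hex_py valor byte_size out) := by unfold Spec_hrt_type_pascii2_hex_py; infer_instance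

-- ===== CLAIM (what is proved, stated in full; the proofs are below) =====
def Claim_equal_hrt_type_pascii2_hex_py : Prop := ∀ (valor : String) (byte_size : Int), Dom_hrt_type_pascii2_hex_py valor byte_size → Pre_hrt_type_pascii2_hex_py valor byte_size → Spec_hrt_type_pascii2_hex_py valor byte_size (hrt_type_pascii2_hex_py valor byte_size)

-- ===== LEMMAS AND PROOFS =====

-- fixed-width big-endian binary rendering (proof device relating the two pipelines)
def pvBits : Nat → Nat → List Char
  | 0, _ => []
  | n + 1, c => pvBits n (c / 2) ++ [if c % 2 = 1 then '1' else '0']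

theorem pvBits_length (n c : Nat) : (pvBits n c).length = n := by
  induction n generalizing c with
  | zero => rfl
  | succ n ih => simp [pvBits, ih]

theorem pvBits_split (k m c : Nat) :
    pvBits (m + k) c = pvBits m (c / 2 ^ k) ++ pvBits k (c % 2 ^ k) := by
  induction k generalizing c with
  | zero => simp [pvBits]
  | succ k ih =>
    have h1 : c / 2 / 2 ^ k = c / 2 ^ (k + 1) := by
      rw [Nat.div_div_eq_div_mul]; ring_nf
    have h2 : c / 2 % 2 ^ k = c % 2 ^ (k + 1) / 2 := by
      rw [pow_succ, mul_comm, Nat.mod_mul_right_div_self]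
    have h3 : c % 2 ^ (k + 1) % 2 = c % 2 := by
      exact Nat.mod_mod_of_dvd c (dvd_pow_self 2 (by omega))
    show pvBits (m + k) (c / 2) ++ _ = _ ++ (pvBits k (c % 2 ^ (k + 1) / 2) ++ _)
    rw [ih (c / 2), h1, h2, h3, List.append_assoc]

set_option maxRecDepth 10000 in
theorem pvBin6_eq : ∀ c : Nat, c < 64 → pvBin6 (c : Int) = pvBits 6 c := by decide

set_option maxRecDepth 100000 in
theorem pvParse8 : ∀ b : Nat, b < 256 →
    PySem.Int.ofCharsBase? (pvBits 8 b) 2 = some (b : Int) := by decide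

theorem pvBits24_eq (a b c d : Nat) (_ha : a < 64) (hb : b < 64) (hc : c < 64) (hd : d < 64) :
    pvBits 6 a ++ (pvBits 6 b ++ (pvBits 6 c ++ pvBits 6 d)) =
      pvBits 24 (((a * 64 + b) * 64 + c) * 64 + d) := by
  have h64 : (2 : Nat) ^ 6 = 64 := by norm_num
  have hd1 : (((a * 64 + b) * 64 + c) * 64 + d) / 2 ^ 6 = (a * 64 + b) * 64 + c := by
    rw [h64]; omega
  have hd2 : (((a * 64 + b) * 64 + c) * 64 + d) % 2 ^ 6 = d := by rw [h64]; omega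
  have hc1 : ((a * 64 + b) * 64 + c) / 2 ^ 6 = a * 64 + b := by rw [h64]; omega
  have hc2 : ((a * 64 + b) * 64 + c) % 2 ^ 6 = c := by rw [h64]; omega
  have hb1 : (a * 64 + b) / 2 ^ 6 = a := by rw [h64]; omega
  have hb2 : (a * 64 + b) % 2 ^ 6 = b := by rw [h64]; omega
  rw [show (24 : Nat) = 18 + 6 from rfl, pvBits_split, hd1, hd2,
      show (18 : Nat) = 12 + 6 from rfl, pvBits_split, hc1, hc2,
      show (12 : Nat) = 6 + 6 from rfl, pvBits_split, hb1, hb2,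
      List.append_assoc, List.append_assoc]

theorem pvBytes_eq (v : Nat) :
    pvBits 24 v = pvBits 8 (v / 65536) ++ (pvBits 8 (v / 256 % 256) ++ pvBits 8 (v % 256)) := by
  rw [show (24 : Nat) = 16 + 8 from rfl, pvBits_split,
      show (16 : Nat) = 8 + 8 from rfl, pvBits_split, List.append_assoc]
  norm_num [Nat.div_div_eq_div_mul]

theorem pvSlice8 (bits : List Char) (k : Nat) :
    PySem.List.slice bits (some (8 * (k : Int))) (some (8 * (k : Int) + 8)) =
      (bits.drop (8 * k)).take 8 := by
  rw [show (8 * (k : Int)) = ((8 * k : Nat) : Int) by push_cast; ring,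
     show ((8 * k : Nat) : Int) + 8 = ((8 * k : Nat) : Int) + ((8 : Nat) : Int) by norm_num]
  exact PySem.List.slice_natCast_add bits (8 * k) 8

theorem pvCode_bounds (c : Char) : 0 ≤ pvPasciiCode c ∧ pvPasciiCode c < 64 := by
  unfold pvPasciiCode
  dsimp only
  split_ifs <;> omega

-- per-chunk function A applies at slice k of the bit string
def pvFA (bits : List Char) (k : Nat) : List Char :=
  match PySem.Int.ofCharsBase? (PySem.List.slice bits (some (8 * (k : Int))) (some (8 * (k : Int) + 8))) 2 with
  | some b => pvHex2 b
  | none => []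

theorem pvChunk (x y z r : List Char) (hx : x.length = 8) (hy : y.length = 8) (hz : z.length = 8) :
    (x ++ (y ++ (z ++ r))).take 8 = x
  ∧ ((x ++ (y ++ (z ++ r))).drop 8).take 8 = y
  ∧ ((x ++ (y ++ (z ++ r))).drop 16).take 8 = z
  ∧ ∀ k : Nat, (x ++ (y ++ (z ++ r))).drop (24 + k) = r.drop k := by
  refine ⟨?_, ?_, ?_, fun k => ?_⟩
  · exact List.take_left' hx
  · rw [List.drop_append, List.drop_eq_nil_of_le (by omega), hx]
    simpa using List.take_left' hy
  · rw [List.drop_append, List.drop_eq_nil_of_le (by omega), hx,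
        List.drop_append, List.drop_eq_nil_of_le (by omega), hy]
    simpa using List.take_left' hz
  · rw [List.drop_append, List.drop_eq_nil_of_le (by omega), hx,
        List.drop_append, List.drop_eq_nil_of_le (by omega), hy,
        List.drop_append, List.drop_eq_nil_of_le (by omega), hz]
    simp
    omega

theorem pvMain (q : Nat) : ∀ codes : List Int, codes.length = 4 * q →
    (∀ c ∈ codes, 0 ≤ c ∧ c < 64) →
    (List.range (3 * q)).flatMap (pvFA (codes.flatMap pvBin6)) = pvPack codes := by
  induction q with
  | zero =>
    intro codes hlen _
    have h : codes = [] := List.eq_nil_of_length_eq_zero (by omega)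
    subst h; rfl
  | succ q ih =>
    intro codes hlen hb
    rcases codes with _ | ⟨c0, _ | ⟨c1, _ | ⟨c2, _ | ⟨c3, rest⟩⟩⟩⟩ <;>
      simp only [List.length_cons, List.length_nil] at hlen <;> try omega
    obtain ⟨a, rfl⟩ : ∃ a : Nat, c0 = (a : Int) :=
      ⟨c0.toNat, (Int.toNat_of_nonneg (hb c0 (by simp)).1).symm⟩
    obtain ⟨b, rfl⟩ : ∃ b : Nat, c1 = (b : Int) :=
      ⟨c1.toNat, (Int.toNat_of_nonneg (hb c1 (by simp)).1).symm⟩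
    obtain ⟨c, rfl⟩ : ∃ c : Nat, c2 = (c : Int) :=
      ⟨c2.toNat, (Int.toNat_of_nonneg (hb c2 (by simp)).1).symm⟩
    obtain ⟨d, rfl⟩ : ∃ d : Nat, c3 = (d : Int) :=
      ⟨c3.toNat, (Int.toNat_of_nonneg (hb c3 (by simp)).1).symm⟩
    have ha64 : a < 64 := by have h := (hb (a : Int) (by simp)).2; omega
    have hb64 : b < 64 := by have h := (hb (b : Int) (by simp)).2; omega
    have hc64 : c < 64 := by have h := (hb (c : Int) (by simp)).2; omega
    have hd64 : d < 64 := by have h := (hb (d : Int) (by simp)).2; omega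
    set v : Nat := ((a * 64 + b) * 64 + c) * 64 + d with hv
    have hbits : ((a : Int) :: (b : Int) :: (c : Int) :: (d : Int) :: rest).flatMap pvBin6
        = pvBits 8 (v / 65536) ++ (pvBits 8 (v / 256 % 256) ++ (pvBits 8 (v % 256) ++ rest.flatMap pvBin6)) := by
      simp only [List.flatMap_cons, pvBin6_eq a ha64, pvBin6_eq b hb64, pvBin6_eq c hc64,
        pvBin6_eq d hd64]
      rw [show pvBits 6 a ++ (pvBits 6 b ++ (pvBits 6 c ++ (pvBits 6 d ++ List.flatMap pvBin6 rest)))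
            = (pvBits 6 a ++ (pvBits 6 b ++ (pvBits 6 c ++ pvBits 6 d))) ++ List.flatMap pvBin6 rest
          from by simp [List.append_assoc],
        pvBits24_eq a b c d ha64 hb64 hc64 hd64, pvBytes_eq, ← hv]
      simp [List.append_assoc]
    obtain ⟨h0, h1, h2, h3⟩ := pvChunk (pvBits 8 (v / 65536)) (pvBits 8 (v / 256 % 256))
      (pvBits 8 (v % 256)) (rest.flatMap pvBin6) (pvBits_length _ _) (pvBits_length _ _) (pvBits_length _ _)
    have hB0 : v / 65536 < 256 := by omega
    have hB1 : v / 256 % 256 < 256 := by omega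
    have hB2 : v % 256 < 256 := by omega
    have hf0 : pvFA (pvBits 8 (v / 65536) ++ (pvBits 8 (v / 256 % 256) ++ (pvBits 8 (v % 256) ++ rest.flatMap pvBin6))) 0
        = pvHex2 ((v / 65536 : Nat) : Int) := by
      unfold pvFA
      rw [pvSlice8, show 8 * (0:Nat) = 0 from rfl, List.drop_zero, h0, pvParse8 _ hB0]
    have hf1 : pvFA (pvBits 8 (v / 65536) ++ (pvBits 8 (v / 256 % 256) ++ (pvBits 8 (v % 256) ++ rest.flatMap pvBin6))) 1
        = pvHex2 ((v / 256 % 256 : Nat) : Int) := by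
      unfold pvFA
      rw [pvSlice8, show 8 * (1:Nat) = 8 from rfl, h1, pvParse8 _ hB1]
    have hf2 : pvFA (pvBits 8 (v / 65536) ++ (pvBits 8 (v / 256 % 256) ++ (pvBits 8 (v % 256) ++ rest.flatMap pvBin6))) 2
        = pvHex2 ((v % 256 : Nat) : Int) := by
      unfold pvFA
      rw [pvSlice8, show 8 * (2:Nat) = 16 from rfl, h2, pvParse8 _ hB2]
    have hshift : (fun k => pvFA (pvBits 8 (v / 65536) ++ (pvBits 8 (v / 256 % 256) ++ (pvBits 8 (v % 256) ++ rest.flatMap pvBin6))) (3 + k))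
        = pvFA (rest.flatMap pvBin6) := by
      funext k
      unfold pvFA
      rw [pvSlice8, pvSlice8, show 8 * (3 + k) = 24 + 8 * k from by ring, h3]
    have hrest : ∀ c' ∈ rest, 0 ≤ c' ∧ c' < 64 := fun c' hc' => hb c' (by simp [hc'])
    have hlen' : rest.length = 4 * q := by omega
    rw [hbits, show 3 * (q + 1) = 3 + 3 * q from by ring, List.range_add, List.flatMap_append,
      List.flatMap_map, show List.range 3 = [0, 1, 2] from rfl]
    simp only [List.flatMap_cons, List.flatMap_nil]
    rw [hf0, hf1, hf2, hshift, ih rest hlen' hrest]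
    have hP : pvPack ((a : Int) :: (b : Int) :: (c : Int) :: (d : Int) :: rest)
        = pvHex2 (PySem.Int.floordiv ((((a : Int) * 64 + b) * 64 + c) * 64 + d) 65536)
          ++ pvHex2 (PySem.Int.mod (PySem.Int.floordiv ((((a : Int) * 64 + b) * 64 + c) * 64 + d) 256) 256)
          ++ pvHex2 (PySem.Int.mod ((((a : Int) * 64 + b) * 64 + c) * 64 + d) 256)
          ++ pvPack rest := rfl
    have e0 : PySem.Int.floordiv ((((a : Int) * 64 + b) * 64 + c) * 64 + d) 65536
        = ((v / 65536 : Nat) : Int) := by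
      rw [show (((a : Int) * 64 + b) * 64 + c) * 64 + d = ((v : Nat) : Int) from by push_cast [hv]; ring,
        PySem.Int.floordiv_eq_ediv_of_pos (by norm_num)]
      omega
    have e1 : PySem.Int.mod (PySem.Int.floordiv ((((a : Int) * 64 + b) * 64 + c) * 64 + d) 256) 256
        = ((v / 256 % 256 : Nat) : Int) := by
      rw [show (((a : Int) * 64 + b) * 64 + c) * 64 + d = ((v : Nat) : Int) from by push_cast [hv]; ring,
        PySem.Int.floordiv_eq_ediv_of_pos (by norm_num),
        PySem.Int.mod_eq_emod_of_pos (by norm_num)]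
      omega
    have e2 : PySem.Int.mod ((((a : Int) * 64 + b) * 64 + c) * 64 + d) 256
        = ((v % 256 : Nat) : Int) := by
      rw [show (((a : Int) * 64 + b) * 64 + c) * 64 + d = ((v : Nat) : Int) from by push_cast [hv]; ring,
        PySem.Int.mod_eq_emod_of_pos (by norm_num)]
      omega
    rw [hP, e0, e1, e2]
    simp [List.append_assoc]

-- A's normalization loop computes the map of B's per-char helper
theorem pvNormFold (S : List Char) :
    S.foldl (fun acc c =>
      let oc : Int := c.toNat
      let oc := if 0x61 ≤ oc ∧ oc ≤ 0x7A then oc - 0x20 else oc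
      let oc := if ¬ (0x20 ≤ oc ∧ oc ≤ 0x5F) then (0x20 : Int) else oc
      acc ++ [oc - 0x20]) ([] : List Int) = S.map pvPasciiCode := by
  have h := PySem.List.foldl_congr_mem S
    (fun acc c =>
      let oc : Int := c.toNat
      let oc := if 0x61 ≤ oc ∧ oc ≤ 0x7A then oc - 0x20 else oc
      let oc := if ¬ (0x20 ≤ oc ∧ oc ≤ 0x5F) then (0x20 : Int) else oc
      acc ++ [oc - 0x20])
    (fun acc c => acc ++ [pvPasciiCode c]) []
    (by
      intro acc x _
      unfold pvPasciiCode
      dsimp only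
      split_ifs <;> simp)
  rw [h]
  simpa using PySem.List.foldl_append_singleton_eq_map pvPasciiCode S []

theorem pvBinFold (codes : List Int) :
    codes.foldl (fun acc code => acc ++ pvBin6 code) ([] : List Char) = codes.flatMap pvBin6 := by
  simpa using PySem.List.foldl_append_eq_flatMap pvBin6 codes []

theorem pvFlatLen (codes : List Int) (hb : ∀ c ∈ codes, 0 ≤ c ∧ c < 64) :
    (codes.flatMap pvBin6).length = 6 * codes.length := by
  induction codes with
  | nil => simp
  | cons c cs ih =>
    have hc := hb c (by simp)
    obtain ⟨a, rfl⟩ : ∃ a : Nat, c = (a : Int) := ⟨c.toNat, (Int.toNat_of_nonneg hc.1).symm⟩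
    have ha : a < 64 := by have := hc.2; omega
    simp [pvBin6_eq a ha, pvBits_length, ih (fun c' hc' => hb c' (by simp [hc']))]
    ring

theorem pvHexFold (codes : List Int) (T : Nat) (hT : 0 < T) (hlen : codes.length = 4 * T)
    (hb : ∀ c ∈ codes, 0 ≤ c ∧ c < 64) :
    (PySem.List.pyRange 0 (((codes.flatMap pvBin6).length : Nat) : Int) 8).foldl (fun acc i =>
      acc ++ (match PySem.Int.ofCharsBase? (PySem.List.slice (codes.flatMap pvBin6) (some i) (some (i + 8))) 2 with
              | some b => pvHex2 b
              | none => [])) ([] : List Char) = pvPack codes := by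
  have hblen : (codes.flatMap pvBin6).length = 24 * T := by rw [pvFlatLen codes hb, hlen]; ring
  rw [hblen, PySem.List.pyRange_of_pos 0 ((24 * T : Nat) : Int) (by norm_num),
    if_pos (by exact_mod_cast Nat.pos_of_ne_zero (by positivity)),
    show (((24 * T : Nat) : Int) - 0 + 8 - 1) / 8 = ((3 * T : Nat) : Int) from by push_cast; omega,
    Int.toNat_natCast]
  simp only [List.foldl_map, zero_add]
  have hcong := PySem.List.foldl_congr_mem (List.range (3 * T))
    (fun acc (k : Nat) =>
      acc ++ (match PySem.Int.ofCharsBase? (PySem.List.slice (codes.flatMap pvBin6) (some (8 * (k : Int))) (some (8 * (k : Int) + 8))) 2 with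
              | some b => pvHex2 b
              | none => []))
    (fun acc k => acc ++ pvFA (codes.flatMap pvBin6) k) []
    (fun acc k _ => rfl)
  rw [hcong, PySem.List.foldl_append_eq_flatMap (pvFA (codes.flatMap pvBin6)) (List.range (3 * T)) [],
    List.nil_append]
  exact pvMain T codes hlen hb

-- ===== VERDICT (by name: the statement is the Claim_ definition above) =====
theorem hrt_type_pascii2_hex_py_spec : Claim_equal_hrt_type_pascii2_hex_py := by
  intro valor byte_size _hdom hpre
  unfold Spec_hrt_type_pascii2_hex_py hrt_type_pascii2_hex_py hrt_type_pascii2_hex_py_alt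
  by_cases hle : byte_size ≤ 0
  · simp [hle]
  · have hmod : PySem.Int.mod byte_size 3 = 0 := hpre.resolve_left hle
    have hne : ¬ (PySem.Int.mod byte_size 3 ≠ 0) := not_not_intro hmod
    have hdvd : (3 : Int) ∣ byte_size := (PySem.Int.mod_eq_zero_iff_dvd byte_size 3).mp hmod
    obtain ⟨t, ht⟩ := hdvd
    have ht0 : 0 < t := by omega
    obtain ⟨T, rfl⟩ : ∃ T : Nat, t = (T : Int) := ⟨t.toNat, (Int.toNat_of_nonneg (by omega)).symm⟩
    have hT : 0 < T := by exact_mod_cast ht0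
    have hnc : PySem.Int.floordiv (byte_size * 8) 6 = ((4 * T : Nat) : Int) := by
      rw [PySem.Int.floordiv_eq_ediv_of_pos (by norm_num)]
      push_cast [ht]
      omega
    simp only [if_neg hle, if_neg hne, hnc, Int.toNat_natCast, pvNormFold, pvBinFold]
    have hslice : PySem.List.slice valor.toList (some (-((4 * T : Nat) : Int))) none
        = valor.toList.drop (valor.toList.length - 4 * T) :=
      PySem.List.slice_from_neg_natCast valor.toList (4 * T) (by omega)
    have hSeq : (if ((valor.toList.length : Int) > ((4 * T : Nat) : Int)) then
          PySem.List.slice valor.toList (some (-((4 * T : Nat) : Int))) none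
        else if ((valor.toList.length : Int) < ((4 * T : Nat) : Int)) then
          valor.toList ++ List.replicate (4 * T - valor.toList.length) ' '
        else valor.toList)
        = PySem.List.slice valor.toList (some (-((4 * T : Nat) : Int))) none
          ++ List.replicate (4 * T - (PySem.List.slice valor.toList (some (-((4 * T : Nat) : Int))) none).length) ' ' := by
      rw [hslice]
      rcases lt_trichotomy valor.toList.length (4 * T) with h | h | h
      · rw [if_neg (by push_cast; omega), if_pos (by exact_mod_cast h),
          show valor.toList.length - 4 * T = 0 from by omega, List.drop_zero]
      · rw [if_neg (by push_cast; omega), if_neg (by push_cast; omega),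
          show valor.toList.length - 4 * T = 0 from by omega, List.drop_zero,
          show 4 * T - valor.toList.length = 0 from by omega]
        simp
      · rw [if_pos (by exact_mod_cast h), List.length_drop,
          show 4 * T - (valor.toList.length - (valor.toList.length - 4 * T)) = 0 from by omega]
        simp
    rw [hSeq]
    have hSlen : (PySem.List.slice valor.toList (some (-((4 * T : Nat) : Int))) none
        ++ List.replicate (4 * T - (PySem.List.slice valor.toList (some (-((4 * T : Nat) : Int))) none).length) ' ').length
        = 4 * T := by
      rw [List.length_append, List.length_replicate, hslice, List.length_drop]
      omega
    have hbnd : ∀ c ∈ (PySem.List.slice valor.toList (some (-((4 * T : Nat) : Int))) none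
        ++ List.replicate (4 * T - (PySem.List.slice valor.toList (some (-((4 * T : Nat) : Int))) none).length) ' ').map pvPasciiCode,
        0 ≤ c ∧ c < 64 := by
      intro c hc
      obtain ⟨ch, _, rfl⟩ := List.mem_map.mp hc
      exact pvCode_bounds ch
    rw [pvHexFold _ T hT (by rw [List.length_map, hSlen]) hbnd]
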